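-- pv_equiv track=rewrite | github.com/itsjeet14/Assignment-4-Graphs | _4_ques_4_assignment.py | count_trees_in_forest
-- ===== SOURCE A (Python) =====
-- class Node:
--
--     def __init__(self, key):
--         self.key = key
--         self.children = []
--
-- def count_trees_in_forest(forest):
--
--     # check if forest is empty
--     if len(forest) == 0:
--         return 0
--
--     # create a dictionary to store the nodes in the forest
--     nodes = {}
--
--     # create a node object for each node in the forest
--     for i in range(len(forest)):
--         nodes[i+1] = Node(i+1)
--
--     # build the tree structure for the forest
--     for i in range(len(forest)):
--         if forest[i] != 0:
--             nodes[forest[i]].children.append(nodes[i+1])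
--
--     # perform DFS on each node in the forest to count the number of trees
--     tree_count = 0
--
--     for i in range(len(forest)):
--         if nodes[i+1] is not None and len(nodes[i+1].children) == 0:
--             stack = []
--             stack.append(nodes[i+1])
--
--             while len(stack) > 0:
--                 current_node = stack.pop()
--
--                 for child in current_node.children:
--                     stack.append(child)
--
--                 current_node.children = []
--
--             tree_count += 1
--
--     return tree_count
-- ===== SOURCE B (Python) =====
-- def count_trees_in_forest(forest):
--     n = len(forest)
--     counts = {k: 0 for k in range(1, n + 1)}
--     for p in forest:
--         if p != 0:
--             counts[p] += 1  # dict read: KeyError for parent values outside 1..n, as in A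
--     return sum(1 for k in range(1, n + 1) if counts[k] == 0)
-- ===== Notes on version B (the rewrite author's own statement) =====
-- stated objective: simpler
-- what changed: Replaces the Node-object graph, adjacency lists and the per-leaf DFS stack loop with a single child-count dictionary filled in one pass over the parent array, then counts the keys whose child count is zero.
import Mathlib
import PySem

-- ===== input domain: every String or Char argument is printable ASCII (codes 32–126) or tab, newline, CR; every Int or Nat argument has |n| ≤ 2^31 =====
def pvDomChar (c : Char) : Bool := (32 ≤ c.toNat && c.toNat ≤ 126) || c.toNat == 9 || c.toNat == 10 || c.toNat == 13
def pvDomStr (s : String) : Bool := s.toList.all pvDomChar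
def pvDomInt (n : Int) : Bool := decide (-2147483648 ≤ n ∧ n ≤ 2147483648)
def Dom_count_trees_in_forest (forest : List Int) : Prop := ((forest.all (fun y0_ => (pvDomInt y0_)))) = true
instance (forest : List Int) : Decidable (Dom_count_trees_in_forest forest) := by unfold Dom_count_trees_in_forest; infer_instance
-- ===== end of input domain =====

-- B drops the Node class, adjacency lists and per-leaf DFS of A: it keeps one child-count
-- dictionary filled in a single pass and counts the zero-count keys (objective: simpler).

-- ===== PORT A =====
-- A Node is its key plus its children list; since keys 1..n are unique, the object graph is
-- modeled as a dict key ↦ list of child keys (children append = list append at the parent key).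
-- the DFS while-loop (stack append/pop at the end) with fuel; inside Pre_ it runs one iteration
def pvDfsA (fuel : Nat) (stack : List Int) (d : PySem.Dict Int (List Int)) :
    PySem.Dict Int (List Int) :=
  match fuel with
  | 0 => d
  | fuel + 1 =>
    match stack.getLast? with
    | none => d
    | some cur =>
      let rest := stack.dropLast
      let cs := d.getD cur []
      pvDfsA fuel (rest ++ cs) (d.insert cur [])

def count_trees_in_forest (forest : List Int) : Int :=
  if forest.length = 0 then 0
  else
    let n := forest.length
    -- nodes[i+1] = Node(i+1)
    let nodes : PySem.Dict Int (List Int) :=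
      (List.range n).foldl (fun d (i : Nat) => d.insert ((i : Int) + 1) []) PySem.Dict.empty
    -- build the tree structure: nodes[forest[i]].children.append(nodes[i+1])
    let nodes :=
      (PySem.List.enumerate forest).foldl
        (fun d p => if p.2 ≠ 0 then d.insert p.2 (d.getD p.2 [] ++ [p.1 + 1]) else d) nodes
    -- DFS from each childless node; 'nodes[i+1] is not None' is always true (dict of Nodes)
    let r :=
      (List.range n).foldl
        (fun (st : PySem.Dict Int (List Int) × Int) (i : Nat) =>
          if (st.1.getD ((i : Int) + 1) []).length = 0 then
            (pvDfsA (n + 1) [((i : Int) + 1)] st.1, st.2 + 1)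
          else st) (nodes, 0)
    r.2

-- ===== PORT B =====
def count_trees_in_forest_alt (forest : List Int) : Int :=
  let n := forest.length
  let counts : PySem.Dict Int Int :=
    (PySem.List.pyRange 1 ((n : Int) + 1) 1).foldl (fun d k => d.insert k 0) PySem.Dict.empty
  let counts :=
    forest.foldl (fun d p => if p ≠ 0 then d.insert p (d.getD p 0 + 1) else d) counts
  (PySem.List.pyRange 1 ((n : Int) + 1) 1).foldl
    (fun acc k => if counts.getD k 0 = 0 then acc + 1 else acc) 0

-- ===== PRECONDITION & SPEC =====
-- Pre_ excludes exactly the inputs where Python A raises KeyError: a nonzero parent value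
-- outside 1..len(forest) (nodes[forest[i]] has no such key).
def Pre_count_trees_in_forest (forest : List Int) : Prop :=
  ∀ p ∈ forest, p = 0 ∨ (1 ≤ p ∧ p ≤ (forest.length : Int))
instance (forest : List Int) : Decidable (Pre_count_trees_in_forest forest) := by
  unfold Pre_count_trees_in_forest; infer_instance

def pvWitness_count_trees_in_forest : List Int := [0, 1, 1]

def Spec_count_trees_in_forest (forest : List Int) (out : Int) : Prop :=
  out = count_trees_in_forest_alt forest
instance (forest : List Int) (out : Int) : Decidable (Spec_count_trees_in_forest forest out) := by
  unfold Spec_count_trees_in_forest; infer_instance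

-- ===== CLAIM (what is proved, stated in full; the proofs are below) =====
def Claim_equal_count_trees_in_forest : Prop :=
  ∀ (forest : List Int), Dom_count_trees_in_forest forest →
    Pre_count_trees_in_forest forest →
      Spec_count_trees_in_forest forest (count_trees_in_forest forest)

-- ===== LEMMAS AND PROOFS =====

-- the DFS on an empty stack returns the dict unchanged
theorem pvDfsA_nil (f : Nat) (d : PySem.Dict Int (List Int)) : pvDfsA f [] d = d := by
  cases f <;> simp [pvDfsA]

-- the DFS started at a childless node changes no getD value
theorem pvDfsA_getD (f : Nat) (k : Int) (d : PySem.Dict Int (List Int))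
    (hk : d.getD k [] = []) (j : Int) :
    (pvDfsA (f + 1) [k] d).getD j [] = d.getD j [] := by
  show (pvDfsA f ([k].dropLast ++ d.getD k []) (d.insert k [])).getD j [] = d.getD j []
  rw [hk, List.dropLast_singleton, List.append_nil, pvDfsA_nil,
    PySem.Dict.getD_insert]
  by_cases hj : j = k
  · rw [if_pos hj, hj, hk]
  · rw [if_neg hj]

-- phase-1 dict of A: every children list starts empty
theorem baseA_getD (l : List Nat) :
    ∀ (d : PySem.Dict Int (List Int)), (∀ j, d.getD j [] = []) →
      ∀ j, (l.foldl (fun d (i : Nat) => d.insert ((i : Int) + 1) []) d).getD j [] = [] := by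
  induction l with
  | nil => intro d h j; exact h j
  | cons x xs ih =>
      intro d h j
      simp only [List.foldl_cons]
      exact ih _ (fun j => by simp [PySem.Dict.getD_insert, h j]) j

-- phase-1 dict of B: every count starts at 0
theorem baseB_getD (l : List Int) :
    ∀ (c : PySem.Dict Int Int), (∀ j, c.getD j 0 = 0) →
      ∀ j, (l.foldl (fun d k => d.insert k 0) c).getD j 0 = 0 := by
  induction l with
  | nil => intro c h j; exact h j
  | cons x xs ih =>
      intro c h j
      simp only [List.foldl_cons]
      exact ih _ (fun j => by simp [PySem.Dict.getD_insert, h j]) j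

-- main invariant: A's children lists and B's counters stay length-aligned through the build pass
theorem rel_build (xs : List Int) :
    ∀ (s : Int) (d : PySem.Dict Int (List Int)) (c : PySem.Dict Int Int),
      (∀ j, ((d.getD j []).length : Int) = c.getD j 0) →
      ∀ j,
      ((((PySem.List.enumerate xs s).foldl
          (fun d p => if p.2 ≠ 0 then d.insert p.2 (d.getD p.2 [] ++ [p.1 + 1]) else d)
          d).getD j []).length : Int)
        = (xs.foldl (fun d p => if p ≠ 0 then d.insert p (d.getD p 0 + 1) else d) c).getD j 0 := by
  induction xs with
  | nil => intro s d c h j; simpa [PySem.List.enumerate_nil] using h j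
  | cons x xs ih =>
      intro s d c h j
      simp only [PySem.List.enumerate_cons, List.foldl_cons]
      by_cases hx : x = 0
      · rw [if_neg (by simp [hx]), if_neg (by simp [hx])]
        exact ih (s + 1) d c h j
      · rw [if_pos (by simp [hx]), if_pos (by simp [hx])]
        refine ih (s + 1) _ _ (fun j => ?_) j
        by_cases hj : j = x
        · subst hj; simp [h j]
        · simp [PySem.Dict.getD_insert, hj, h j]

-- the counting loop of A only reads getD values, and the DFS preserves them
theorem count_loop (l : List Nat) (n : Nat) (dA : PySem.Dict Int (List Int)) :
    ∀ (d : PySem.Dict Int (List Int)) (cnt : Int),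
      (∀ j, d.getD j [] = dA.getD j []) →
      (l.foldl
        (fun (st : PySem.Dict Int (List Int) × Int) (i : Nat) =>
          if (st.1.getD ((i : Int) + 1) []).length = 0 then
            (pvDfsA (n + 1) [((i : Int) + 1)] st.1, st.2 + 1)
          else st) (d, cnt)).2
      = l.foldl (fun cnt (i : Nat) =>
          if (dA.getD ((i : Int) + 1) []).length = 0 then cnt + 1 else cnt) cnt := by
  induction l with
  | nil => intro d cnt _; rfl
  | cons x xs ih =>
      intro d cnt h
      simp only [List.foldl_cons, h ((x : Int) + 1)]
      by_cases hx : (dA.getD ((x : Int) + 1) []).length = 0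
      · rw [if_pos hx, if_pos hx]
        refine ih _ _ (fun j => ?_)
        rw [pvDfsA_getD]
        · exact h j
        · rw [h]; exact List.length_eq_zero_iff.mp hx
      · rw [if_neg hx, if_neg hx]
        exact ih _ _ h

-- ===== VERDICT (by name: the statement is the Claim_ definition above) =====
theorem count_trees_in_forest_spec : Claim_equal_count_trees_in_forest := by
  intro forest _ _
  unfold Spec_count_trees_in_forest
  simp only [count_trees_in_forest, count_trees_in_forest_alt]
  set dA := (PySem.List.enumerate forest).foldl
      (fun d p => if p.2 ≠ 0 then d.insert p.2 (d.getD p.2 [] ++ [p.1 + 1]) else d)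
      ((List.range forest.length).foldl
        (fun d (i : Nat) => d.insert ((i : Int) + 1) ([] : List Int)) PySem.Dict.empty)
    with hdA
  set cB := forest.foldl (fun d p => if p ≠ 0 then d.insert p (d.getD p 0 + 1) else d)
      ((PySem.List.pyRange 1 ((forest.length : Int) + 1) 1).foldl
        (fun d k => d.insert k (0 : Int)) PySem.Dict.empty)
    with hcB
  have key : ∀ j : Int, ((dA.getD j []).length : Int) = cB.getD j 0 := by
    intro j
    rw [hdA, hcB]
    refine rel_build forest 0 _ _ (fun j => ?_) j
    rw [baseA_getD _ _ (fun j => by simp) j, baseB_getD _ _ (fun j => by simp) j]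
    rfl
  have hN : (((forest.length : Int) + 1 - 1).toNat) = forest.length := by omega
  have hrange : PySem.List.pyRange 1 ((forest.length : Int) + 1)
      = (List.range forest.length).map (fun (k : Nat) => 1 + (k : Int)) := by
    rw [PySem.List.pyRange_one, hN]
  by_cases h0 : forest.length = 0
  · rw [if_pos h0, hrange, h0]
    rfl
  · rw [if_neg h0]
    rw [count_loop (List.range forest.length) forest.length dA dA 0 (fun j => rfl)]
    rw [hrange, List.foldl_map]
    refine PySem.List.foldl_congr_mem _ _ _ _ (fun acc i _ => ?_)
    rw [show (1 : Int) + (i : Int) = (i : Int) + 1 by ring]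
    have hk := key ((i : Int) + 1)
    by_cases hz : (dA.getD ((i : Int) + 1) []).length = 0
    · have hc : cB.getD ((i : Int) + 1) 0 = 0 := by rw [← hk]; exact_mod_cast hz
      rw [if_pos hz, if_pos hc]
    · have hc : cB.getD ((i : Int) + 1) 0 ≠ 0 := by rw [← hk]; exact_mod_cast hz
      rw [if_neg hz, if_neg hc]
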